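-- pv_equiv track=rewrite | github.com/sunilviyer/ai-agents | agents/gita-guide/scripts/gita_db_loader.py | get_primary_translation
-- ===== SOURCE A (Python) =====
-- def get_primary_translation(verse_data):
--     """
--     Get the best English translation for a verse.
--     Priority: Swami Sivananda > Prabhupada > Purohit > Gambirananda > any
--     """
--     # Priority order of translators for the primary English translation
--     priority = ["siva", "prabhu", "purohit", "gambir", "adi", "san", "abhinav", "raman"]
--
--     for key in priority:
--         if key in verse_data and isinstance(verse_data[key], dict):
--             if "et" in verse_data[key] and verse_data[key]["et"]:
--                 return verse_data[key]["et"]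
--
--     # Fallback: try any author with 'et' field
--     for key, val in verse_data.items():
--         if isinstance(val, dict) and "et" in val and val["et"]:
--             return val["et"]
--
--     return None
-- ===== SOURCE B (Python) =====
-- def get_primary_translation(verse_data):
--     """Single pass over the items, tracking the lowest-rank valid translation
--     (priority keys rank 0..7, anything else rank 8; first occurrence wins ties)."""
--     priority = ["siva", "prabhu", "purohit", "gambir", "adi", "san", "abhinav", "raman"]
--     rank = {k: i for i, k in enumerate(priority)}
--     best = None
--     for key, val in verse_data.items():
--         if isinstance(val, dict):
--             et = val.get("et")
--             if et:
--                 r = rank.get(key, len(priority))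
--                 if best is None or r < best[0]:
--                     best = (r, et)
--     return best[1] if best is not None else None
-- ===== Notes on version B (the rewrite author's own statement) =====
-- stated objective: alternative
-- what changed: Replaces A's two scans (an 8-key priority probing loop followed by a fallback scan over the items) with a single pass over the items that tracks the minimum-rank valid candidate, using a rank dict built from the priority list.
import Mathlib
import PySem

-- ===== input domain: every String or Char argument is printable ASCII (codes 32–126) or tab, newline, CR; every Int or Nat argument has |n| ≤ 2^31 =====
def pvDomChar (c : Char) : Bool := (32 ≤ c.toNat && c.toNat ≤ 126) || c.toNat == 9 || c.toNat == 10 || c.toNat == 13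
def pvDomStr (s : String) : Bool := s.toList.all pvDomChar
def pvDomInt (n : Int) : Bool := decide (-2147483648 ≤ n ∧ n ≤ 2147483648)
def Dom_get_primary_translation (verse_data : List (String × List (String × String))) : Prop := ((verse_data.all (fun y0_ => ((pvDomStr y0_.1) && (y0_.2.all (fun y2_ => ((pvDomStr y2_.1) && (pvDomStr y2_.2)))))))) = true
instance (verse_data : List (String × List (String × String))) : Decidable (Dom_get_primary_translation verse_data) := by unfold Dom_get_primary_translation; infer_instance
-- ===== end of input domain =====

-- B replaces A's priority-probing loop plus fallback scan with one pass tracking the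
-- minimum-rank valid candidate; equivalence is proved on association lists with unique keys.

-- ===== PORT A =====
-- A's first loop: for key in priority: probe verse_data[key] for a truthy "et"
def pvPrioLoopA (verse_data : List (String × List (String × String))) : List String → Option String
  | [] => none
  | key :: rest =>
    match (PySem.Dict.mk verse_data).get? key with
    | some sub =>
      match (PySem.Dict.mk sub).get? "et" with
      | some et => if et ≠ "" then some et else pvPrioLoopA verse_data rest
      | none => pvPrioLoopA verse_data rest
    | none => pvPrioLoopA verse_data rest

-- A's second loop: for key, val in verse_data.items(): first truthy "et"
def pvFallbackA : List (String × List (String × String)) → Option String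
  | [] => none
  | (_, val) :: rest =>
    match (PySem.Dict.mk val).get? "et" with
    | some et => if et ≠ "" then some et else pvFallbackA rest
    | none => pvFallbackA rest

def get_primary_translation (verse_data : List (String × List (String × String))) : Option String :=
  match pvPrioLoopA verse_data ["siva", "prabhu", "purohit", "gambir", "adi", "san", "abhinav", "raman"] with
  | some et => some et
  | none => pvFallbackA verse_data

-- ===== PORT B =====
def pvPriorityB : List String := ["siva", "prabhu", "purohit", "gambir", "adi", "san", "abhinav", "raman"]

-- rank = {k: i for i, k in enumerate(priority)}
def pvRankB : PySem.Dict String Int :=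
  (PySem.List.enumerate pvPriorityB).foldl (fun d p => d.insert p.2 p.1) PySem.Dict.empty

-- the single pass, carrying best : Option (rank, et)
def pvBestLoopB : List (String × List (String × String)) → Option (Int × String) → Option (Int × String)
  | [], best => best
  | (key, val) :: rest, best =>
    match (PySem.Dict.mk val).get? "et" with
    | none => pvBestLoopB rest best
    | some et =>
      if et ≠ "" then
        let r := pvRankB.getD key (pvPriorityB.length : Int)
        match best with
        | none => pvBestLoopB rest (some (r, et))
        | some b => if r < b.1 then pvBestLoopB rest (some (r, et)) else pvBestLoopB rest best
      else pvBestLoopB rest best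

def get_primary_translation_alt (verse_data : List (String × List (String × String))) : Option String :=
  match pvBestLoopB verse_data none with
  | some b => some b.2
  | none => none

-- ===== PRECONDITION & SPEC =====
-- Pre_ excludes association lists with duplicate keys: those represent no Python dict
-- (dict keys are unique), and on them A's per-key first-occurrence lookup is accidental.
def Pre_get_primary_translation (verse_data : List (String × List (String × String))) : Prop :=
  (verse_data.map Prod.fst).Nodup

instance (verse_data : List (String × List (String × String))) : Decidable (Pre_get_primary_translation verse_data) := by
  unfold Pre_get_primary_translation; infer_instance

def pvWitness_get_primary_translation : (List (String × List (String × String))) :=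
  [("siva", [("et", "He who")]), ("x", [("et", "")])]

def Spec_get_primary_translation (verse_data : List (String × List (String × String))) (out : Option String) : Prop := out = get_primary_translation_alt verse_data
instance (verse_data : List (String × List (String × String))) (out : Option String) : Decidable (Spec_get_primary_translation verse_data out) := by unfold Spec_get_primary_translation; infer_instance

-- ===== CLAIM (what is proved, stated in full; the proofs are below) =====
def Claim_equal_get_primary_translation : Prop := ∀ (verse_data : List (String × List (String × String))), Dom_get_primary_translation verse_data → Pre_get_primary_translation verse_data → Spec_get_primary_translation verse_data (get_primary_translation verse_data)

-- ===== LEMMAS AND PROOFS =====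

-- the truthiness test "et" in val and val["et"] (shared characterisation of both ports' check)
def pvChk (val : List (String × String)) : Option String :=
  match (PySem.Dict.mk val).get? "et" with
  | some et => if et ≠ "" then some et else none
  | none => none

-- the candidate a key contributes: verse_data[key] probed for a truthy "et"
def pvG (verse_data : List (String × List (String × String))) (key : String) : Option String :=
  ((PySem.Dict.mk verse_data).get? key).bind pvChk

def pvRankOf (key : String) : Int := pvRankB.getD key (pvPriorityB.length : Int)

theorem pvRankOf_unfold (k : String) : pvRankOf k =
    if k = "raman" then 7 else if k = "abhinav" then 6 else if k = "san" then 5 else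
    if k = "adi" then 4 else if k = "gambir" then 3 else if k = "purohit" then 2 else
    if k = "prabhu" then 1 else if k = "siva" then 0 else 8 := by
  simp [pvRankOf, pvRankB, pvPriorityB, PySem.List.enumerate_cons, PySem.List.enumerate_nil,
        List.foldl, PySem.Dict.getD_insert, PySem.Dict.getD_empty]

theorem pvRankOf_nonneg (k : String) : 0 ≤ pvRankOf k := by
  rw [pvRankOf_unfold]; split_ifs <;> omega

theorem pvRankOf_le8 (k : String) : pvRankOf k ≤ 8 := by
  rw [pvRankOf_unfold]; split_ifs <;> omega

theorem pvRankOf_mem {p : String} (hp : pvRankOf p < 8) : p ∈ pvPriorityB := by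
  rw [pvRankOf_unfold] at hp; split_ifs at hp <;> simp_all [pvPriorityB]

theorem pvRankOf_inj {p q : String} (hp : pvRankOf p < 8) (h : pvRankOf p = pvRankOf q) : p = q := by
  have h1 := pvRankOf_mem hp
  have h2 := pvRankOf_mem (p := q) (by omega)
  fin_cases h1 <;> fin_cases h2 <;> first | rfl | (exfalso; revert h; decide)

-- pvPrioLoopA step, phrased through pvG
theorem pvPrioLoopA_cons (vd : List (String × List (String × String))) (k : String) (ks : List String) :
    pvPrioLoopA vd (k :: ks) = (pvG vd k).or (pvPrioLoopA vd ks) := by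
  cases hv : (PySem.Dict.mk vd).get? k with
  | none => simp [pvPrioLoopA, pvG, hv]
  | some sub =>
    cases he : (PySem.Dict.mk sub).get? "et" with
    | none => simp [pvPrioLoopA, pvG, pvChk, hv, he]
    | some et =>
      by_cases h : et = "" <;> simp [pvPrioLoopA, pvG, pvChk, hv, he, h]

theorem pvFallbackA_cons (kv : String × List (String × String)) (rest : List (String × List (String × String))) :
    pvFallbackA (kv :: rest) = (pvChk kv.2).or (pvFallbackA rest) := by
  obtain ⟨k, v⟩ := kv
  cases he : (PySem.Dict.mk v).get? "et" with
  | none => simp [pvFallbackA, pvChk, he]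
  | some et => by_cases h : et = "" <;> simp [pvFallbackA, pvChk, he, h]

theorem pvG_cons (k : String) (v : List (String × String)) (rest : List (String × List (String × String))) (p : String) :
    pvG ((k, v) :: rest) p = if k = p then pvChk v else pvG rest p := by
  simp only [pvG, PySem.Dict.get?_mk_cons, beq_iff_eq]
  by_cases h : k = p <;> simp [h]

theorem pvG_of_not_mem {rest : List (String × List (String × String))} {k : String}
    (h : k ∉ rest.map Prod.fst) : pvG rest k = none := by
  induction rest with
  | nil => rfl
  | cons kv t ih =>
    obtain ⟨k', v'⟩ := kv
    rw [List.map_cons, List.mem_cons] at h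
    push Not at h
    rw [pvG_cons, if_neg (fun he => h.1 he.symm)]
    exact ih h.2

-- the running-best loop merges its seed with the list's own best
theorem pvBestLoopB_merge (l : List (String × List (String × String))) (b : Int × String) :
    pvBestLoopB l (some b) = match pvBestLoopB l none with
      | none => some b
      | some c => if c.1 < b.1 then some c else some b := by
  induction l generalizing b with
  | nil => simp [pvBestLoopB]
  | cons kv rest ih =>
    obtain ⟨k, v⟩ := kv
    cases hv : (PySem.Dict.mk v).get? "et" with
    | none => simp only [pvBestLoopB, hv]; exact ih b
    | some et =>
      by_cases he : et = ""
      · simp only [pvBestLoopB, hv, he, ne_eq, not_true_eq_false, if_false]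
        exact ih b
      · simp only [pvBestLoopB, hv, ne_eq, he, not_false_eq_true, if_true]
        set r := pvRankB.getD k (pvPriorityB.length : Int) with hr
        by_cases hlt : r < b.1
        · simp only [hlt, if_true]
          rw [ih (r, et)]
          cases hrest : pvBestLoopB rest none with
          | none => simp [hlt]
          | some c =>
            simp only
            split_ifs <;> simp_all <;> omega
        · simp only [hlt, if_false]
          rw [ih b, ih (r, et)]
          cases hrest : pvBestLoopB rest none with
          | none => simp [hlt]
          | some c =>
            simp only
            split_ifs <;> simp_all <;> omega

theorem pvBestLoopB_cons (k : String) (v : List (String × String)) (rest : List (String × List (String × String))) :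
    pvBestLoopB ((k, v) :: rest) none = match pvChk v with
      | none => pvBestLoopB rest none
      | some et => match pvBestLoopB rest none with
        | none => some (pvRankOf k, et)
        | some c => if c.1 < pvRankOf k then some c else some (pvRankOf k, et) := by
  cases hv : (PySem.Dict.mk v).get? "et" with
  | none => simp [pvBestLoopB, pvChk, hv]
  | some et =>
    by_cases he : et = ""
    · simp [pvBestLoopB, pvChk, hv, he]
    · simp only [pvBestLoopB, pvChk, hv, ne_eq, he, not_false_eq_true, if_true, pvRankOf]
      rw [pvBestLoopB_merge]

-- the main invariant: what pvBestLoopB's result says about every key's candidate and the fallback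
theorem pvInv (l : List (String × List (String × String))) (hnd : (l.map Prod.fst).Nodup) :
    match pvBestLoopB l none with
    | none => (∀ p, pvG l p = none) ∧ pvFallbackA l = none
    | some c =>
        0 ≤ c.1 ∧ c.1 ≤ 8 ∧
        (∀ p, pvRankOf p < c.1 → pvG l p = none) ∧
        (c.1 < 8 → ∀ p, pvRankOf p = c.1 → pvG l p = some c.2) ∧
        (c.1 = 8 → (∀ p, pvRankOf p < 8 → pvG l p = none) ∧ pvFallbackA l = some c.2) := by
  induction l with
  | nil => exact ⟨fun p => rfl, rfl⟩
  | cons kv rest ih =>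
    obtain ⟨k, v⟩ := kv
    simp only [List.map_cons, List.nodup_cons] at hnd
    have ih' := ih hnd.2
    have hk : pvG rest k = none := pvG_of_not_mem hnd.1
    rw [pvBestLoopB_cons]
    cases hc : pvChk v with
    | none =>
      -- head contributes nothing; everything transfers pointwise
      have hg : ∀ p, pvG ((k, v) :: rest) p = pvG rest p := by
        intro p; rw [pvG_cons]
        by_cases h : k = p
        · subst h; rw [if_pos rfl, hc, ← hk]
        · rw [if_neg h]
      have hf : pvFallbackA ((k, v) :: rest) = pvFallbackA rest := by
        rw [pvFallbackA_cons, hc]; rfl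
      cases hrest : pvBestLoopB rest none with
      | none =>
        rw [hrest] at ih'
        dsimp only
        exact ⟨fun p => (hg p).trans (ih'.1 p), hf.trans ih'.2⟩
      | some c =>
        rw [hrest] at ih'
        dsimp only
        exact ⟨ih'.1, ih'.2.1, fun p hp => (hg p).trans (ih'.2.2.1 p hp),
               fun h8 p hp => (hg p).trans (ih'.2.2.2.1 h8 p hp),
               fun h8 => ⟨fun p hp => (hg p).trans ((ih'.2.2.2.2 h8).1 p hp), hf.trans (ih'.2.2.2.2 h8).2⟩⟩
    | some et =>
      have hgk : pvG ((k, v) :: rest) k = some et := by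
        rw [pvG_cons, if_pos rfl, hc]
      have hgne : ∀ p, p ≠ k → pvG ((k, v) :: rest) p = pvG rest p := by
        intro p hp; rw [pvG_cons, if_neg (fun h => hp h.symm)]
      have hf : pvFallbackA ((k, v) :: rest) = some et := by
        rw [pvFallbackA_cons, hc]; rfl
      have hkle := pvRankOf_le8 k
      cases hrest : pvBestLoopB rest none with
      | none =>
        rw [hrest] at ih'
        dsimp only
        refine ⟨pvRankOf_nonneg k, hkle, fun p hp => ?_, fun h8 p hp => ?_, fun h8 => ⟨fun p hp => ?_, hf⟩⟩
        · have hpk : p ≠ k := fun h => by subst h; omega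
          rw [hgne p hpk]; exact ih'.1 p
        · have : p = k := pvRankOf_inj (hp ▸ h8) hp
          subst this; exact hgk
        · have hpk : p ≠ k := fun h => by subst h; omega
          rw [hgne p hpk]; exact ih'.1 p
      | some c =>
        rw [hrest] at ih'
        obtain ⟨hc0, hc8', hA, hB, hC⟩ := ih'
        dsimp only
        by_cases hlt : c.1 < pvRankOf k
        · -- rest's best wins
          rw [if_pos hlt]
          dsimp only
          refine ⟨hc0, hc8', fun p hp => ?_, fun h8 p hp => ?_, fun h8 => ?_⟩
          · have hpk : p ≠ k := fun h => by subst h; omega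
            rw [hgne p hpk]; exact hA p hp
          · have hpk : p ≠ k := fun h => by subst h; omega
            rw [hgne p hpk]; exact hB h8 p hp
          · omega
        · -- the head wins (strictly smaller or equal-rank-first)
          rw [if_neg hlt]
          dsimp only
          refine ⟨pvRankOf_nonneg k, hkle, fun p hp => ?_, fun h8 p hp => ?_, fun h8 => ⟨fun p hp => ?_, hf⟩⟩
          · have hpk : p ≠ k := fun h => by subst h; omega
            rw [hgne p hpk]; exact hA p (by omega)
          · have : p = k := pvRankOf_inj (hp ▸ h8) hp
            subst this; exact hgk
          · have hc8 : c.1 = 8 := by omega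
            have hpk : p ≠ k := fun h => by subst h; omega
            rw [hgne p hpk]; exact (hC hc8).1 p hp

-- A as an .or of the two loops
theorem pvA_eq_or (vd : List (String × List (String × String))) :
    get_primary_translation vd =
      (pvPrioLoopA vd ["siva", "prabhu", "purohit", "gambir", "adi", "san", "abhinav", "raman"]).or
        (pvFallbackA vd) := by
  simp only [get_primary_translation]
  cases pvPrioLoopA vd ["siva", "prabhu", "purohit", "gambir", "adi", "san", "abhinav", "raman"] <;> rfl

theorem pvPrio_unfold (vd : List (String × List (String × String))) :
    pvPrioLoopA vd ["siva", "prabhu", "purohit", "gambir", "adi", "san", "abhinav", "raman"] =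
      (pvG vd "siva").or ((pvG vd "prabhu").or ((pvG vd "purohit").or ((pvG vd "gambir").or
        ((pvG vd "adi").or ((pvG vd "san").or ((pvG vd "abhinav").or (pvG vd "raman"))))))) := by
  simp only [pvPrioLoopA_cons]
  simp [pvPrioLoopA]

-- ===== VERDICT (by name: the statement is the Claim_ definition above) =====
theorem get_primary_translation_spec : Claim_equal_get_primary_translation := by
  intro vd _ hpre
  unfold Spec_get_primary_translation
  have inv := pvInv vd hpre
  rw [pvA_eq_or, pvPrio_unfold]
  unfold get_primary_translation_alt
  cases hb : pvBestLoopB vd none with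
  | none =>
    rw [hb] at inv
    simp [inv.1 "siva", inv.1 "prabhu", inv.1 "purohit", inv.1 "gambir",
          inv.1 "adi", inv.1 "san", inv.1 "abhinav", inv.1 "raman", inv.2]
  | some c =>
    rw [hb] at inv
    obtain ⟨hc0, hcle, h1, h2, h3⟩ := inv
    by_cases hr8 : c.1 = 8
    · obtain ⟨hnone, hfb⟩ := h3 hr8
      simp [hnone "siva" (by decide),
            hnone "prabhu" (by decide),
            hnone "purohit" (by decide),
            hnone "gambir" (by decide),
            hnone "adi" (by decide),
            hnone "san" (by decide),
            hnone "abhinav" (by decide),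
            hnone "raman" (by decide), hfb]
    · have hub : c.1 < 8 := by omega
      obtain ⟨r, s⟩ := c
      simp only at hc0 hub h1 h2 ⊢
      have h2' := h2 hub
      interval_cases r
      · simp [h2' "siva" (by decide)]
      · simp [h1 "siva" (by decide),
              h2' "prabhu" (by decide)]
      · simp [h1 "siva" (by decide),
              h1 "prabhu" (by decide),
              h2' "purohit" (by decide)]
      · simp [h1 "siva" (by decide),
              h1 "prabhu" (by decide),
              h1 "purohit" (by decide),
              h2' "gambir" (by decide)]
      · simp [h1 "siva" (by decide),
              h1 "prabhu" (by decide),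
              h1 "purohit" (by decide),
              h1 "gambir" (by decide),
              h2' "adi" (by decide)]
      · simp [h1 "siva" (by decide),
              h1 "prabhu" (by decide),
              h1 "purohit" (by decide),
              h1 "gambir" (by decide),
              h1 "adi" (by decide),
              h2' "san" (by decide)]
      · simp [h1 "siva" (by decide),
              h1 "prabhu" (by decide),
              h1 "purohit" (by decide),
              h1 "gambir" (by decide),
              h1 "adi" (by decide),
              h1 "san" (by decide),
              h2' "abhinav" (by decide)]
      · simp [h1 "siva" (by decide),
              h1 "prabhu" (by decide),
              h1 "purohit" (by decide),
              h1 "gambir" (by decide),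
              h1 "adi" (by decide),
              h1 "san" (by decide),
              h1 "abhinav" (by decide),
              h2' "raman" (by decide)]
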